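-- pv_equiv track=rewrite | github.com/Anish-Sethi-12122/py-dbms-cli | pydbms/main/pydbms_mysql.py | semicolon_in_query
-- ===== SOURCE A (Python) =====
-- def semicolon_in_query(query: str) -> bool:
--     in_single = False
--     in_double = False
--
--     for ch in query:
--         if ch == "'" and not in_double:
--             in_single = not in_single
--         elif ch == '"' and not in_single:
--             in_double = not in_double
--         elif ch == ";" and not in_single and not in_double:
--             return True
--
--     return False
-- ===== SOURCE B (Python) =====
-- def semicolon_in_query(query: str) -> bool:
--     # Segment-jumping scan: find the next quote, check the unquoted prefix for ';',
--     # then jump past the matching closer; no per-character state flags.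
--     s = query
--     while True:
--         i = next((k for k, c in enumerate(s) if c in "'\""), -1)
--         if i == -1:
--             return ';' in s
--         if ';' in s[:i]:
--             return True
--         j = s.find(s[i], i + 1)
--         if j == -1:
--             return False
--         s = s[j + 1:]
-- ===== Notes on version B (the rewrite author's own statement) =====
-- stated objective: alternative
-- what changed: Replaced A's per-character scan with two boolean quote-state flags by a segment-jumping loop: find the next quote character, test the unquoted prefix for ';', then jump directly past the matching closing quote (or stop if the quote is unterminated).
import Mathlib
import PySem

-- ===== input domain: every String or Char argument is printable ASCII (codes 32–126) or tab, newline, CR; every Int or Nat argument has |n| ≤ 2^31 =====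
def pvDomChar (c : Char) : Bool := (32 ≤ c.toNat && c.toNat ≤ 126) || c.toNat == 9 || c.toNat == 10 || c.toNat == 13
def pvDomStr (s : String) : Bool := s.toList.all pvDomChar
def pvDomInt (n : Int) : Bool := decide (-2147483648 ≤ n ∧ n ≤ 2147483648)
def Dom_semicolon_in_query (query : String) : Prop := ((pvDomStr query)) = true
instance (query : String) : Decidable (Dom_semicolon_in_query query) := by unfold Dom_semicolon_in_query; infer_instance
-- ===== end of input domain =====

-- B replaces A's per-character two-flag scan by a segment-jumping scan (find next quote,
-- check the unquoted prefix, jump past the matching closer); objective: alternative structure.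

-- ===== PORT A =====
-- the for-loop over the characters with its two boolean flags and early return
def pvALoop : List Char → Bool → Bool → Bool
  | [], _, _ => false
  | c :: t, s, d =>
    if c = '\'' && !d then pvALoop t (!s) d
    else if c = '"' && !s then pvALoop t s (!d)
    else if c = ';' && !s && !d then true
    else pvALoop t s d

def semicolon_in_query (query : String) : Bool := pvALoop query.toList false false

-- ===== PORT B =====
def pvIsQuote (c : Char) : Bool := c = '\'' || c = '"'

-- Source B's while-loop: next quote index via findIdx? (the enumerate/next search),
-- ';' in the prefix, s.find(s[i], i+1) via findIdx? on the tail, then loop on the rest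
def pvBLoop (l : List Char) : Bool :=
  match h : l.findIdx? pvIsQuote with
  | none => l.contains ';'
  | some i =>
    if (l.take i).contains ';' then true
    else
      match (l.drop (i + 1)).findIdx? (fun c => c = l.getD i ' ') with
      | none => false
      | some j => pvBLoop ((l.drop (i + 1)).drop (j + 1))
termination_by l.length
decreasing_by
  have hi : i < l.length := (List.findIdx?_eq_some_iff_findIdx_eq.mp h).1
  simp only [List.length_drop]
  omega

def semicolon_in_query_alt (query : String) : Bool := pvBLoop query.toList

-- ===== PRECONDITION & SPEC =====
def Spec_semicolon_in_query (query : String) (out : Bool) : Prop := out = semicolon_in_query_alt query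
instance (query : String) (out : Bool) : Decidable (Spec_semicolon_in_query query out) := by unfold Spec_semicolon_in_query; infer_instance

-- ===== CLAIM (what is proved, stated in full; the proofs are below) =====
def Claim_equal_semicolon_in_query : Prop := ∀ (query : String), Dom_semicolon_in_query query → Spec_semicolon_in_query query (semicolon_in_query query)

-- ===== LEMMAS AND PROOFS =====

-- no quote char anywhere: A's scan is just a membership test for ';'
theorem pvA_no_quote : ∀ l : List Char, l.findIdx? pvIsQuote = none →
    pvALoop l false false = l.contains ';' := by
  intro l
  induction l with
  | nil => intro _; rfl
  | cons c t ih =>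
    intro h
    rw [List.findIdx?_cons] at h
    by_cases hq : pvIsQuote c = true
    · rw [if_pos hq] at h; exact absurd h (by simp)
    · rw [if_neg hq] at h
      cases hft : t.findIdx? pvIsQuote with
      | some j => rw [hft] at h; simp at h
      | none =>
        have hc1 : ¬ c = '\'' := by intro hc; simp [pvIsQuote, hc] at hq
        have hc2 : ¬ c = '"' := by intro hc; simp [pvIsQuote, hc] at hq
        by_cases hc3 : c = ';'
        · simp [pvALoop, hc3]
        · have hc3' : ¬ (';' = c) := fun hh => hc3 hh.symm
          simp [pvALoop, hc1, hc2, hc3, hc3', ih hft]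

-- inside a single-quoted span: A skips to the next "'" (or returns false)
theorem pvA_skip_single : ∀ l : List Char,
    pvALoop l true false =
      (match l.findIdx? (fun c => c = '\'') with
        | none => false
        | some j => pvALoop (l.drop (j + 1)) false false) := by
  intro l
  induction l with
  | nil => rfl
  | cons c t ih =>
    rw [List.findIdx?_cons]
    by_cases hc : c = '\''
    · simp [pvALoop, hc]
    · simp only [hc, decide_false, if_false, Bool.false_eq_true]
      have : pvALoop (c :: t) true false = pvALoop t true false := by
        simp [pvALoop, hc]
      rw [this, ih]
      cases h : t.findIdx? (fun c => c = '\'') with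
      | none => simp
      | some j => simp

-- inside a double-quoted span: A skips to the next '"' (or returns false)
theorem pvA_skip_double : ∀ l : List Char,
    pvALoop l false true =
      (match l.findIdx? (fun c => c = '"') with
        | none => false
        | some j => pvALoop (l.drop (j + 1)) false false) := by
  intro l
  induction l with
  | nil => rfl
  | cons c t ih =>
    rw [List.findIdx?_cons]
    by_cases hc : c = '"'
    · have hc1 : ¬ c = '\'' := by rw [hc]; decide
      simp [pvALoop, hc]
    · simp only [hc, decide_false, if_false, Bool.false_eq_true]
      have : pvALoop (c :: t) false true = pvALoop t false true := by
        by_cases hc1 : c = '\''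
        · simp [pvALoop, hc1]
        · by_cases hc3 : c = ';' <;> simp [pvALoop, hc, hc1, hc3]
      rw [this, ih]
      cases h : t.findIdx? (fun c => c = '"') with
      | none => simp
      | some j => simp

-- up to the first quote (at index i) A tests the prefix for ';' and then enters quote state
theorem pvA_prefix : ∀ (l : List Char) (i : Nat), l.findIdx? pvIsQuote = some i →
    pvALoop l false false =
      (if (l.take i).contains ';' then true
       else if l.getD i ' ' = '\'' then pvALoop (l.drop (i + 1)) true false
       else pvALoop (l.drop (i + 1)) false true) := by
  intro l
  induction l with
  | nil => intro i h; rw [List.findIdx?_nil] at h; simp at h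
  | cons c t ih =>
    intro i h
    rw [List.findIdx?_cons] at h
    by_cases hq : pvIsQuote c = true
    · rw [if_pos hq] at h
      cases h
      by_cases hc : c = '\''
      · simp [pvALoop, hc]
      · have hc2 : c = '"' := by
          simp [pvIsQuote, hc] at hq; exact hq
        simp [pvALoop, hc2]
    · rw [if_neg hq] at h
      cases hft : t.findIdx? pvIsQuote with
      | none => rw [hft] at h; simp at h
      | some j =>
        rw [hft] at h
        simp only [Option.map_some, Option.some.injEq] at h
        subst h
        have hc1 : ¬ c = '\'' := by intro hc; simp [pvIsQuote, hc] at hq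
        have hc2 : ¬ c = '"' := by intro hc; simp [pvIsQuote, hc] at hq
        by_cases hc3 : c = ';'
        · simp [pvALoop, hc3, List.take_succ_cons]
        · have hc3' : ¬ (';' = c) := fun hh => hc3 hh.symm
          have heq : pvALoop (c :: t) false false = pvALoop t false false := by
            simp [pvALoop, hc1, hc2, hc3]
          rw [heq, ih j hft]
          simp [List.take_succ_cons, hc3']

-- main loop equivalence, by strong induction on the length of the remaining text
theorem pvAB : ∀ l : List Char, pvALoop l false false = pvBLoop l := by
  intro l
  induction hn : l.length using Nat.strong_induction_on generalizing l with
  | _ n ih =>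
    subst hn
    rw [pvBLoop]
    cases hf : l.findIdx? pvIsQuote with
    | none =>
      simpa using pvA_no_quote l hf
    | some i =>
      obtain ⟨hlt, hidx⟩ := List.findIdx?_eq_some_iff_findIdx_eq.mp hf
      have hq5 : l[i]? = some (l[i]'hlt) := List.getElem?_eq_getElem hlt
      have hqq : pvIsQuote (l[i]'hlt) = true := by
        subst hidx; exact List.findIdx_getElem
      have hgd : l.getD i ' ' = l[i]'hlt := by
        simp [List.getD_eq_getElem?_getD, hq5]
      simp only [hf]
      rw [pvA_prefix l i hf, hgd]
      by_cases hp : (l.take i).contains ';' = true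
      · rw [if_pos hp, if_pos hp]
      · rw [if_neg hp, if_neg hp]
        have hqor : l[i]'hlt = '\'' ∨ l[i]'hlt = '"' := by
          simpa [pvIsQuote] using hqq
        rcases hqor with h1 | h1 <;> rw [h1]
        · rw [if_pos rfl, pvA_skip_single]
          cases hf2 : (l.drop (i + 1)).findIdx? (fun c => c = '\'') with
          | none => simp only [hf2]
          | some j =>
            simp only [hf2]
            exact ih ((l.drop (i + 1)).drop (j + 1)).length
              (by simp only [List.length_drop]; omega) _ rfl
        · rw [if_neg (by decide), pvA_skip_double]
          cases hf2 : (l.drop (i + 1)).findIdx? (fun c => c = '"') with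
          | none => simp only [hf2]
          | some j =>
            simp only [hf2]
            exact ih ((l.drop (i + 1)).drop (j + 1)).length
              (by simp only [List.length_drop]; omega) _ rfl

-- ===== VERDICT (by name: the statement is the Claim_ definition above) =====
theorem semicolon_in_query_spec : Claim_equal_semicolon_in_query := by
  intro query _
  unfold Spec_semicolon_in_query semicolon_in_query semicolon_in_query_alt
  exact pvAB query.toList
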